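-- pv_equiv track=rewrite | github.com/divs-spec/Leetcode-All-Questions | Leetcode Contest/Biweekly Contest 159/Count Prime-Gap Balanced Subarrays.py | primeSubarray
-- ===== SOURCE A (Python) =====
-- from typing import List
-- from math import isqrt
-- from collections import deque
-- from math import isqrt
-- from typing import List
--
-- def _sieve(limit: int) -> List[bool]:
--     """Simple sieve up to ‘limit’ (inclusive)."""
--     is_prime = [False, False] + [True] * (limit - 1)
--     for p in range(2, isqrt(limit) + 1):
--         if is_prime[p]:
--             is_prime[p * p : limit + 1 : p] = [False] * (((limit - p * p) // p) + 1)
--     return is_prime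
--
-- def primeSubarray(nums: List[int], k: int) -> int:
--     if len(nums) < 2:
--         return 0
--
--     is_prime = _sieve(max(nums))
--     n = len(nums)
--
--     minD, maxD = deque(), deque()      # (idx, value)
--     primeIdx = deque()                 # indices of primes in window
--     left = ans = 0
--
--     for right, val in enumerate(nums):
--         if is_prime[val]:
--             primeIdx.append(right)
--
--             while minD and minD[-1][1] > val:
--                 minD.pop()
--             minD.append((right, val))
--
--             while maxD and maxD[-1][1] < val:
--                 maxD.pop()
--             maxD.append((right, val))
--
--         # shrink window until gap ≤ k
--         while primeIdx and maxD[0][1] - minD[0][1] > k: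
--             left += 1
--             while primeIdx and primeIdx[0] < left:
--                 primeIdx.popleft()
--             while minD and minD[0][0] < left:
--                 minD.popleft()
--             while maxD and maxD[0][0] < left:
--                 maxD.popleft()
--
--         # count sub‑arrays ending at ‘right’
--         if len(primeIdx) >= 2:
--             second_last = primeIdx[-2]
--             ans += second_last - left + 1
--
--     return ans
-- ===== SOURCE B (Python) =====
-- from math import isqrt
--
-- def _sieve_b(limit):
--     """Sieve of Eratosthenes up to `limit` (inclusive), explicit inner loop."""
--     is_prime = [False, False] + [True] * (limit - 1)
--     for p in range(2, isqrt(limit) + 1):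
--         if is_prime[p]:
--             for m in range(p * p, limit + 1, p):
--                 is_prime[m] = False
--     return is_prime
--
-- def primeSubarray(nums, k):
--     if len(nums) < 2:
--         return 0
--     is_prime = _sieve_b(max(nums))
--     ans = left = 0
--     ps = []  # indices of primes in the current window [left, right]
--     for right, val in enumerate(nums):
--         if is_prime[val]:
--             ps.append(right)
--         # shrink window until the prime gap is <= k; min/max by direct scan
--         while ps and max(nums[i] for i in ps) - min(nums[i] for i in ps) > k:
--             left += 1
--             if ps[0] < left:
--                 ps.pop(0)
--         if len(ps) >= 2:
--             ans += ps[-2] - left + 1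
--     return ans
-- ===== Notes on version B (the rewrite author's own statement) =====
-- stated objective: simpler
-- what changed: B drops A's two monotonic (idx,value) deques minD/maxD entirely and keeps only the window's prime-index list, computing the window's min/max prime value by a direct scan in the shrink condition (and marks sieve multiples with an explicit inner loop instead of slice assignment).
-- outside the precondition, e.g. on primeSubarray([5, -100], 0): A raises IndexError, B raises IndexError; on primeSubarray([-2, -3], 1): A raises ValueError, B raises ValueError
import Mathlib
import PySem

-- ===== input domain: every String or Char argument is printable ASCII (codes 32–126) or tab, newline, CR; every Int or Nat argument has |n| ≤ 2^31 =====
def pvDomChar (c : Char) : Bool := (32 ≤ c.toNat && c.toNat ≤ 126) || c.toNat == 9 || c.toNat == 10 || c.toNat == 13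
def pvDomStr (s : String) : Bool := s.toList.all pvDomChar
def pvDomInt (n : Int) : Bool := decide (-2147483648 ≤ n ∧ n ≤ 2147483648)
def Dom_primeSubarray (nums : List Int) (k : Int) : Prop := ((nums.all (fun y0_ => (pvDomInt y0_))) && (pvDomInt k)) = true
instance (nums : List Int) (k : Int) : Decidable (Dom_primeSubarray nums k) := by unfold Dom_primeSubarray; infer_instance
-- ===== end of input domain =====

-- B replaces A's two monotonic min/max deques by direct min/max scans over the prime
-- indices of the window (objective: simpler — same window/counting logic, less bookkeeping).

-- ===== PORT A =====
-- termination helpers for the ports' shrink loops (cited in decreasing_by)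
theorem pvFoldlMax_le_init (l : List Int) (a : Int) : a ≤ l.foldl max a :=
  (PySem.List.le_foldl_max l a).1

-- `while d and d[-1][1] > val: d.pop()`  (literal back-pop loop)
def pvPopBackGT (d : List (Int × Int)) (v : Int) : List (Int × Int) :=
  if d ≠ [] ∧ (d.getLastD (0, 0)).2 > v then pvPopBackGT d.dropLast v else d
termination_by d.length
decreasing_by
  have := List.length_pos_of_ne_nil ‹_ ∧ _›.1
  simp [List.length_dropLast]; omega

-- `while d and d[-1][1] < val: d.pop()`
def pvPopBackLT (d : List (Int × Int)) (v : Int) : List (Int × Int) :=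
  if d ≠ [] ∧ (d.getLastD (0, 0)).2 < v then pvPopBackLT d.dropLast v else d
termination_by d.length
decreasing_by
  have := List.length_pos_of_ne_nil ‹_ ∧ _›.1
  simp [List.length_dropLast]; omega

-- `while d and d[0][0] < left: d.popleft()`
def pvPopFrontIdx (d : List (Int × Int)) (left : Int) : List (Int × Int) :=
  match d with
  | [] => []
  | e :: rest => if e.1 < left then pvPopFrontIdx rest left else e :: rest

-- `while primeIdx and primeIdx[0] < left: primeIdx.popleft()`
def pvPopFrontLt (d : List Int) (left : Int) : List Int :=
  match d with
  | [] => []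
  | i :: rest => if i < left then pvPopFrontLt rest left else i :: rest

theorem pvPopFrontLt_length_le (d : List Int) (left : Int) :
    (pvPopFrontLt d left).length ≤ d.length := by
  induction d with
  | nil => simp [pvPopFrontLt]
  | cons i rest ih => by_cases hi : i < left <;> simp [pvPopFrontLt, hi] <;> omega

-- the inner `while primeIdx and maxD[0][1] - minD[0][1] > k: …` shrink loop of A
def pvShrinkA (k : Int) (minD maxD : List (Int × Int)) (pidx : List Int) (left : Int) :
    List (Int × Int) × List (Int × Int) × List Int × Int :=
  if pidx ≠ [] ∧ (maxD.headD (0, 0)).2 - (minD.headD (0, 0)).2 > k then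
    let left' := left + 1
    pvShrinkA k (pvPopFrontIdx minD left') (pvPopFrontIdx maxD left')
      (pvPopFrontLt pidx left') left'
  else (minD, maxD, pidx, left)
termination_by (pidx.length, (pidx.foldl max 0 + 2 - left).toNat)
decreasing_by
  obtain ⟨hne, -⟩ := ‹_ ∧ _›
  obtain ⟨i, rest, rfl⟩ := List.exists_cons_of_ne_nil hne
  by_cases hi : i < left + 1
  · apply Prod.Lex.left
    have := pvPopFrontLt_length_le rest (left + 1)
    simp [pvPopFrontLt, hi]; omega
  · have hsame : pvPopFrontLt (i :: rest) (left + 1) = i :: rest := by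
      simp [pvPopFrontLt, hi]
    rw [hsame]
    apply Prod.Lex.right
    have h1 : i ≤ (i :: rest).foldl max 0 := by
      have := pvFoldlMax_le_init rest (max 0 i)
      simp [List.foldl_cons]; omega
    omega

-- one iteration of A's `for right, val in enumerate(nums)` body
def pvStepA (isPrime : List Bool) (k : Int)
    (st : List (Int × Int) × List (Int × Int) × List Int × Int × Int) (rv : Int × Int) :
    List (Int × Int) × List (Int × Int) × List Int × Int × Int :=
  let (minD, maxD, pidx, left, ans) := st
  let (right, val) := rv
  -- `if is_prime[val]: …`  (pyGetD: within Pre_ the index is in Python's valid range)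
  let t :=
    if PySem.List.pyGetD isPrime val false then
      (pvPopBackGT minD val ++ [(right, val)], pvPopBackLT maxD val ++ [(right, val)],
       pidx ++ [right])
    else (minD, maxD, pidx)
  let r := pvShrinkA k t.1 t.2.1 t.2.2 left
  -- `if len(primeIdx) >= 2: ans += primeIdx[-2] - left + 1`
  let ans2 := if 2 ≤ r.2.2.1.length then ans + PySem.List.pyGetD r.2.2.1 (-2) 0 - r.2.2.2 + 1
              else ans
  (r.1, r.2.1, r.2.2.1, r.2.2.2, ans2)

-- `_sieve(limit)`: the slice assignment `is_prime[p*p::p] = [False]*cnt` (equal lengths) is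
-- ported as the elementwise fold setting each index of that slice to False — exact.
-- (`isqrt` raises for limit < 0 in Python — those inputs are outside Pre_; Nat.sqrt is isqrt on limit ≥ 0.)
-- (the Python bool list is held as an Array for O(1) assignment; the loop indices p, m
-- are nonnegative and in range, so getD/.toNat/setIfInBounds are exact there)
def pvSieveA (limit : Int) : List Bool :=
  let isp : Array Bool := ([false, false] ++ List.replicate (limit - 1).toNat true).toArray
  ((PySem.List.pyRange 2 ((Nat.sqrt limit.toNat : Int) + 1) 1).foldl
    (fun a p =>
      if a.getD p.toNat false then
        (PySem.List.pyRange (p * p) (limit + 1) p).foldl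
          (fun a2 m => a2.setIfInBounds m.toNat false) a
      else a) isp).toList

def primeSubarray (nums : List Int) (k : Int) : Int :=
  if nums.length < 2 then 0
  else
    let isPrime := pvSieveA ((PySem.List.max? nums (fun x => x)).getD 0)
    ((PySem.List.enumerate nums 0).foldl (pvStepA isPrime k) ([], [], [], 0, 0)).2.2.2.2

-- ===== PORT B =====
-- `_sieve_b(limit)`: same initial list, explicit inner multiple-marking loop
def pvSieveB (limit : Int) : List Bool :=
  let isp : Array Bool := ([false, false] ++ List.replicate (limit - 1).toNat true).toArray
  ((PySem.List.pyRange 2 ((Nat.sqrt limit.toNat : Int) + 1) 1).foldl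
    (fun a p =>
      if a.getD p.toNat false then
        (PySem.List.pyRange (p * p) (limit + 1) p).foldl
          (fun a2 m => a2.setIfInBounds m.toNat false) a
      else a) isp).toList

-- `[nums[i] for i in ps]` (indices in ps are in range in every reachable state)
def pvWinVals (nums : List Int) (ps : List Int) : List Int :=
  ps.map (fun i => PySem.List.pyGetD nums i 0)

-- B's shrink loop: `while ps and max(..) - min(..) > k: left += 1; if ps[0] < left: ps.pop(0)`
def pvShrinkB (nums : List Int) (k : Int) (ps : List Int) (left : Int) : List Int × Int :=
  if ps ≠ [] ∧ (PySem.List.max? (pvWinVals nums ps) (fun x => x)).getD 0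
      - (PySem.List.min? (pvWinVals nums ps) (fun x => x)).getD 0 > k then
    let left' := left + 1
    let ps' := if ps.headD 0 < left' then ps.tail else ps
    pvShrinkB nums k ps' left'
  else (ps, left)
termination_by (ps.length, (ps.foldl max 0 + 2 - left).toNat)
decreasing_by
  obtain ⟨hne, -⟩ := ‹_ ∧ _›
  obtain ⟨i, rest, rfl⟩ := List.exists_cons_of_ne_nil hne
  by_cases hi : i < left + 1
  · apply Prod.Lex.left
    simp [hi]
  · simp only [List.headD_cons]
    rw [dif_neg hi]
    apply Prod.Lex.right
    have h1 : i ≤ (i :: rest).foldl max 0 := by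
      have := pvFoldlMax_le_init rest (max 0 i)
      simp [List.foldl_cons]; omega
    omega

-- one iteration of B's `for right, val in enumerate(nums)` body
def pvStepB (nums : List Int) (isPrime : List Bool) (k : Int)
    (st : List Int × Int × Int) (rv : Int × Int) : List Int × Int × Int :=
  let (ps, left, ans) := st
  let (right, val) := rv
  let ps1 := if PySem.List.pyGetD isPrime val false then ps ++ [right] else ps
  let r := pvShrinkB nums k ps1 left
  let ans2 := if 2 ≤ r.1.length then ans + PySem.List.pyGetD r.1 (-2) 0 - r.2 + 1 else ans
  (r.1, r.2, ans2)

def primeSubarray_alt (nums : List Int) (k : Int) : Int :=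
  if nums.length < 2 then 0
  else
    let isPrime := pvSieveB ((PySem.List.max? nums (fun x => x)).getD 0)
    ((PySem.List.enumerate nums 0).foldl (pvStepB nums isPrime k) ([], 0, 0)).2.2

-- ===== PRECONDITION & SPEC =====
-- Pre_ excludes exactly the inputs where A raises: with len(nums) ≥ 2, `isqrt(max(nums))`
-- raises ValueError when max(nums) < 0, and `is_prime[v]` raises IndexError when
-- v < -len(is_prime) = -(max 2 (max(nums)+1)).  (B raises on the same inputs.)
def Pre_primeSubarray (nums : List Int) (k : Int) : Prop :=
  nums.length < 2 ∨
    (0 ≤ (PySem.List.max? nums (fun x => x)).getD 0 ∧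
     ∀ v ∈ nums, -(max 2 ((PySem.List.max? nums (fun x => x)).getD 0 + 1)) ≤ v)
instance (nums : List Int) (k : Int) : Decidable (Pre_primeSubarray nums k) := by
  unfold Pre_primeSubarray; infer_instance

def pvWitness_primeSubarray : List Int × Int := ([2, 5, 3, 8], 3)

def Spec_primeSubarray (nums : List Int) (k : Int) (out : Int) : Prop := out = primeSubarray_alt nums k
instance (nums : List Int) (k : Int) (out : Int) : Decidable (Spec_primeSubarray nums k out) := by
  unfold Spec_primeSubarray; infer_instance

-- ===== CLAIM (what is proved, stated in full; the proofs are below) =====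
def Claim_equal_primeSubarray : Prop := ∀ (nums : List Int) (k : Int), Dom_primeSubarray nums k → Pre_primeSubarray nums k → Spec_primeSubarray nums k (primeSubarray nums k)

-- ===== LEMMAS AND PROOFS =====

-- value of nums at an index, as both loops read it
def pvVf (nums : List Int) (i : Int) : Int := PySem.List.pyGetD nums i 0

-- model of a monotonic deque over index list l: index i survives iff r (v i) (v j)
-- holds for every later j (r = ≤ models minD, flipped ≥ models maxD)
def pvMono (v : Int → Int) (r : Int → Int → Bool) : List Int → List (Int × Int)
  | [] => []
  | i :: rest =>
      if rest.all (fun j => r (v i) (v j)) then (i, v i) :: pvMono v r rest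
      else pvMono v r rest

-- drop the maximal suffix whose values satisfy p
def pvDropBack (p : Int → Bool) : List (Int × Int) → List (Int × Int)
  | [] => []
  | e :: rest =>
      match pvDropBack p rest with
      | [] => if p e.2 then [] else [e]
      | x :: xs => e :: x :: xs

theorem pvDropBack_append (p : Int → Bool) (l : List (Int × Int)) (e : Int × Int) :
    pvDropBack p (l ++ [e]) = if p e.2 then pvDropBack p l else l ++ [e] := by
  induction l with
  | nil => by_cases hp : p e.2 <;> simp [pvDropBack, hp]
  | cons a l ih =>
      by_cases hp : p e.2
      · simp only [List.cons_append, pvDropBack, ih, if_pos hp]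
      · have hne : l ++ [e] ≠ [] := by simp
        obtain ⟨x, xs, hx⟩ := List.exists_cons_of_ne_nil hne
        rw [List.cons_append, pvDropBack, ih, if_neg hp, hx]
        simp [hp]

theorem pvPopBackGT_eq_dropBack (d : List (Int × Int)) (v : Int) :
    pvPopBackGT d v = pvDropBack (fun a => decide (v < a)) d := by
  induction d using List.reverseRecOn with
  | nil => rw [pvPopBackGT]; rfl
  | append_singleton l e ih =>
      rw [pvPopBackGT, pvDropBack_append]
      by_cases he : e.2 > v
      · rw [if_pos ⟨by simp, by simpa using he⟩, if_pos (by simpa using he)]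
        simp only [List.dropLast_concat, ih]
      · rw [if_neg (by simp [he]), if_neg (by simpa using he)]

theorem pvPopBackLT_eq_dropBack (d : List (Int × Int)) (v : Int) :
    pvPopBackLT d v = pvDropBack (fun a => decide (a < v)) d := by
  induction d using List.reverseRecOn with
  | nil => rw [pvPopBackLT]; rfl
  | append_singleton l e ih =>
      rw [pvPopBackLT, pvDropBack_append]
      by_cases he : e.2 < v
      · rw [if_pos ⟨by simp, by simpa using he⟩, if_pos (by simpa using he)]
        simp only [List.dropLast_concat, ih]
      · rw [if_neg (by simp [he]), if_neg (by simpa using he)]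

theorem pvMono_mem (v : Int → Int) (r : Int → Int → Bool) (l : List Int) (e : Int × Int)
    (he : e ∈ pvMono v r l) : e.1 ∈ l ∧ e.2 = v e.1 := by
  induction l with
  | nil => simp [pvMono] at he
  | cons i rest ih =>
      rw [pvMono] at he
      split at he
      · rcases List.mem_cons.mp he with h | h
        · subst h; simp
        · obtain ⟨h1, h2⟩ := ih h; exact ⟨List.mem_cons_of_mem _ h1, h2⟩
      · obtain ⟨h1, h2⟩ := ih he; exact ⟨List.mem_cons_of_mem _ h1, h2⟩

-- K1: appending a new element to the window = back-pop loop then append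
-- K1: appending a new element to the window = back-pop loop then append
theorem pvDropBack_cons_of_not (p : Int → Bool) (e : Int × Int) (M : List (Int × Int))
    (he : p e.2 = false) : pvDropBack p (e :: M) = e :: pvDropBack p M := by
  rw [pvDropBack]
  cases h : pvDropBack p M with
  | nil => simp [he]
  | cons x xs => rfl

theorem pvDropBack_nil_of_all (p : Int → Bool) (M : List (Int × Int))
    (h : ∀ e ∈ M, p e.2 = true) : pvDropBack p M = [] := by
  induction M with
  | nil => rfl
  | cons e M ih =>
      rw [pvDropBack, ih (fun x hx => h x (List.mem_cons_of_mem _ hx))]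
      simp [h e (List.mem_cons_self)]

theorem pvMono_append (v : Int → Int) (r : Int → Int → Bool)
    (hR1 : ∀ a b c, r a b = false → r a c = true → r c b = false)
    (l : List Int) (j : Int) :
    pvMono v r (l ++ [j]) = pvDropBack (fun a => !r a (v j)) (pvMono v r l) ++ [(j, v j)] := by
  induction l with
  | nil => simp [pvMono, pvDropBack]
  | cons i t ih =>
      rw [List.cons_append, pvMono, pvMono]
      by_cases hc : t.all (fun j' => r (v i) (v j')) = true
      · by_cases hj : r (v i) (v j) = true
        · rw [if_pos (by simp_all), if_pos hc, ih,
              pvDropBack_cons_of_not _ _ _ (by simp [hj])]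
          rfl
        · have hCL : (t ++ [j]).all (fun j' => r (v i) (v j')) = false := by
            simp_all
          rw [if_neg (by simp [hCL]), if_pos hc, ih]
          have hall : ∀ e ∈ pvMono v r t, (fun a => !r a (v j)) e.2 = true := by
            intro e he
            obtain ⟨h1, h2⟩ := pvMono_mem v r t e he
            have hce : r (v i) (v e.1) = true := by
              rw [List.all_eq_true] at hc; exact hc _ h1
            have := hR1 (v i) (v j) (v e.1) (by simpa using hj) hce
            simp [h2, this]
          rw [pvDropBack_nil_of_all _ _ hall,
              pvDropBack_nil_of_all _ _ (by
                intro e he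
                rcases List.mem_cons.mp he with h | h
                · subst h; simp [hj]
                · exact hall e h)]
      · have hCL : (t ++ [j]).all (fun j' => r (v i) (v j')) = false := by
          simp_all
        rw [if_neg (by simp [hCL]), if_neg hc, ih]

-- K2: the front of the modelled deque is an r-extremal element of the window
theorem pvMono_head (v : Int → Int) (r : Int → Int → Bool)
    (hrefl : ∀ a, r a a = true)
    (hR2 : ∀ a b c, r a c = true → r b c = false → r a b = true)
    (l : List Int) (hne : l ≠ []) :
    ∃ i M, pvMono v r l = (i, v i) :: M ∧ i ∈ l ∧ ∀ j ∈ l, r (v i) (v j) = true := by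
  induction l with
  | nil => exact absurd rfl hne
  | cons i t ih =>
      by_cases hc : t.all (fun j => r (v i) (v j)) = true
      · refine ⟨i, pvMono v r t, by rw [pvMono, if_pos hc], List.mem_cons_self, ?_⟩
        intro j hj
        rcases List.mem_cons.mp hj with h | h
        · subst h; exact hrefl _
        · rw [List.all_eq_true] at hc; exact hc _ h
      · have hex : ∃ j0 ∈ t, r (v i) (v j0) = false := by
          by_contra hno
          push_neg at hno
          exact hc (by
            rw [List.all_eq_true]
            intro j hj
            rcases hr : r (v i) (v j) with _ | _
            · exact absurd hr (hno j hj)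
            · rfl)
        obtain ⟨j0, hj0t, hj0⟩ := hex
        have htne : t ≠ [] := by intro hnil; rw [hnil] at hj0t; simp at hj0t
        obtain ⟨i', M, hM, hmem, hall⟩ := ih htne
        refine ⟨i', M, by rw [pvMono, if_neg hc]; exact hM, List.mem_cons_of_mem _ hmem, ?_⟩
        intro j hj
        rcases List.mem_cons.mp hj with h | h
        · subst h; exact hR2 _ _ _ (hall j0 hj0t) hj0
        · exact hall j h

-- the concrete order relations modelling minD and maxD
theorem pvRle_hR1 : ∀ a b c : Int, decide (a ≤ b) = false → decide (a ≤ c) = true →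
    decide (c ≤ b) = false := by intro a b c h1 h2; simp at *; omega
theorem pvRge_hR1 : ∀ a b c : Int, decide (b ≤ a) = false → decide (c ≤ a) = true →
    decide (b ≤ c) = false := by intro a b c h1 h2; simp at *; omega
theorem pvRle_refl : ∀ a : Int, decide (a ≤ a) = true := by intro a; simp
theorem pvRle_hR2 : ∀ a b c : Int, decide (a ≤ c) = true → decide (b ≤ c) = false →
    decide (a ≤ b) = true := by intro a b c h1 h2; simp at *; omega
theorem pvRge_hR2 : ∀ a b c : Int, decide (c ≤ a) = true → decide (c ≤ b) = false →
    decide (b ≤ a) = true := by intro a b c h1 h2; simp at *; omega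

theorem pvFoldlOptExt_some (f : Option Int → Int → Option Int)
    (hf : ∀ a x, ∃ b, f (some a) x = some b) :
    ∀ (t : List Int) (a : Int), ∃ m, t.foldl f (some a) = some m := by
  intro t
  induction t with
  | nil => intro a; exact ⟨a, rfl⟩
  | cons x t ih =>
      intro a
      rw [List.foldl_cons]
      obtain ⟨b, hb⟩ := hf a x
      rw [hb]
      exact ih b

-- front values of the modelled deques = scanned min / max of the window values
theorem pvMono_headD_min (nums : List Int) (ps : List Int) (hne : ps ≠ []) :
    ((pvMono (pvVf nums) (fun a b => decide (a ≤ b)) ps).headD (0, 0)).2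
      = (PySem.List.min? (pvWinVals nums ps) (fun x => x)).getD 0 := by
  obtain ⟨i, M, hM, hmem, hall⟩ :=
    pvMono_head (pvVf nums) (fun a b => decide (a ≤ b)) pvRle_refl pvRle_hR2 ps hne
  rw [hM]
  have hne' : pvWinVals nums ps ≠ [] := by simpa [pvWinVals] using hne
  obtain ⟨m, hm⟩ : ∃ m, PySem.List.min? (pvWinVals nums ps) (fun x => x) = some m := by
    obtain ⟨a, t, ht⟩ := List.exists_cons_of_ne_nil hne'
    rw [ht]
    simp only [PySem.List.min?]
    exact pvFoldlOptExt_some _ (fun a x => by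
      by_cases h : x < a <;> [exact ⟨x, by simp [h]⟩; exact ⟨a, by simp [h]⟩]) t a
  rw [hm]
  have h1 : m ≤ pvVf nums i :=
    PySem.List.min?_isMin hm _ (by simpa [pvWinVals] using List.mem_map_of_mem hmem)
  obtain ⟨j, hj, hjm⟩ : ∃ j ∈ ps, pvVf nums j = m := by
    have := PySem.List.min?_mem hm
    simpa [pvWinVals] using this
  have h2 : pvVf nums i ≤ m := by
    have := hall j hj
    simp at this
    omega
  simp
  omega

theorem pvMono_headD_max (nums : List Int) (ps : List Int) (hne : ps ≠ []) :
    ((pvMono (pvVf nums) (fun a b => decide (b ≤ a)) ps).headD (0, 0)).2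
      = (PySem.List.max? (pvWinVals nums ps) (fun x => x)).getD 0 := by
  obtain ⟨i, M, hM, hmem, hall⟩ :=
    pvMono_head (pvVf nums) (fun a b => decide (b ≤ a)) pvRle_refl pvRge_hR2 ps hne
  rw [hM]
  have hne' : pvWinVals nums ps ≠ [] := by simpa [pvWinVals] using hne
  obtain ⟨m, hm⟩ : ∃ m, PySem.List.max? (pvWinVals nums ps) (fun x => x) = some m := by
    obtain ⟨a, t, ht⟩ := List.exists_cons_of_ne_nil hne'
    rw [ht]
    simp only [PySem.List.max?]
    exact pvFoldlOptExt_some _ (fun a x => by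
      by_cases h : a < x <;> [exact ⟨x, by simp [h]⟩; exact ⟨a, by simp [h]⟩]) t a
  rw [hm]
  have h1 : pvVf nums i ≤ m :=
    PySem.List.max?_isMax hm _ (by simpa [pvWinVals] using List.mem_map_of_mem hmem)
  obtain ⟨j, hj, hjm⟩ : ∃ j ∈ ps, pvVf nums j = m := by
    have := PySem.List.max?_mem hm
    simpa [pvWinVals] using this
  have h2 : m ≤ pvVf nums i := by
    have := hall j hj
    simp at this
    omega
  simp
  omega

-- front-pop helpers
theorem pvPopFrontLt_eq_self (d : List Int) (l : Int) (h : ∀ x ∈ d, l ≤ x) :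
    pvPopFrontLt d l = d := by
  cases d with
  | nil => rfl
  | cons i rest =>
      rw [pvPopFrontLt, if_neg (by have := h i List.mem_cons_self; omega)]

theorem pvPopFrontIdx_eq_self (d : List (Int × Int)) (l : Int)
    (h : ∀ e ∈ d, l ≤ e.1) : pvPopFrontIdx d l = d := by
  cases d with
  | nil => rfl
  | cons e rest =>
      rw [pvPopFrontIdx, if_neg (by have := h e List.mem_cons_self; omega)]

theorem pvPopFrontIdx_mono (v : Int → Int) (r : Int → Int → Bool) (i : Int) (rest : List Int)
    (left : Int) (hlt : i < left) (hrest : ∀ x ∈ rest, left ≤ x) :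
    pvPopFrontIdx (pvMono v r (i :: rest)) left = pvMono v r rest := by
  have hself : pvPopFrontIdx (pvMono v r rest) left = pvMono v r rest := by
    apply pvPopFrontIdx_eq_self
    intro e he
    exact hrest _ (pvMono_mem v r rest e he).1
  rw [pvMono]
  split
  · rw [pvPopFrontIdx, if_pos (by simpa using hlt)]
    exact hself
  · exact hself

theorem pvShrink_eq (nums : List Int) (k : Int) (ps : List Int) (left : Int) :
    List.Pairwise (· < ·) ps → (∀ i ∈ ps, left ≤ i) →
    pvShrinkA k (pvMono (pvVf nums) (fun a b => decide (a ≤ b)) ps)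
               (pvMono (pvVf nums) (fun a b => decide (b ≤ a)) ps) ps left
      = ((pvMono (pvVf nums) (fun a b => decide (a ≤ b)) (pvShrinkB nums k ps left).1),
         (pvMono (pvVf nums) (fun a b => decide (b ≤ a)) (pvShrinkB nums k ps left).1),
         (pvShrinkB nums k ps left).1, (pvShrinkB nums k ps left).2) := by
  fun_induction pvShrinkB nums k ps left with
  | case1 ps left h left' ps' ih =>
      intro hpw hge
      obtain ⟨i, rest, rfl⟩ := List.exists_cons_of_ne_nil h.1
      have hrest : ∀ x ∈ rest, i < x := (List.pairwise_cons.mp hpw).1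
      have hgei : left ≤ i := hge i List.mem_cons_self
      rw [pvShrinkA, if_pos ⟨h.1, by
        rw [pvMono_headD_max nums _ h.1, pvMono_headD_min nums _ h.1]
        exact h.2⟩]
      by_cases hi : i < left + 1
      · have hps' : ps' = rest := by
          show (if (i :: rest).headD 0 < left + 1 then (i :: rest).tail else i :: rest) = rest
          simp [hi]
        have hrge : ∀ x ∈ rest, left + 1 ≤ x := fun x hx => by have := hrest x hx; omega
        have h1 : pvPopFrontLt (i :: rest) (left + 1) = rest := by
          rw [pvPopFrontLt, if_pos hi]
          exact pvPopFrontLt_eq_self _ _ hrge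
        have h2 := pvPopFrontIdx_mono (pvVf nums) (fun a b => decide (a ≤ b)) i rest (left + 1) hi hrge
        have h3 := pvPopFrontIdx_mono (pvVf nums) (fun a b => decide (b ≤ a)) i rest (left + 1) hi hrge
        simp only [show left' = left + 1 from rfl, hps'] at ih ⊢
        rw [h1, h2, h3]
        exact ih (List.pairwise_cons.mp hpw).2 hrge
      · have hps' : ps' = i :: rest := by
          show (if (i :: rest).headD 0 < left + 1 then (i :: rest).tail else i :: rest) = i :: rest
          simp [hi]
        have hall : ∀ x ∈ i :: rest, left + 1 ≤ x := by
          intro x hx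
          rcases List.mem_cons.mp hx with hh | hh
          · omega
          · have := hrest x hh; omega
        have h1 : pvPopFrontLt (i :: rest) (left + 1) = i :: rest :=
          pvPopFrontLt_eq_self _ _ hall
        have h2 : pvPopFrontIdx (pvMono (pvVf nums) (fun a b => decide (a ≤ b)) (i :: rest)) (left + 1)
            = pvMono (pvVf nums) (fun a b => decide (a ≤ b)) (i :: rest) :=
          pvPopFrontIdx_eq_self _ _ (fun e he => hall _ (pvMono_mem _ _ _ e he).1)
        have h3 : pvPopFrontIdx (pvMono (pvVf nums) (fun a b => decide (b ≤ a)) (i :: rest)) (left + 1)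
            = pvMono (pvVf nums) (fun a b => decide (b ≤ a)) (i :: rest) :=
          pvPopFrontIdx_eq_self _ _ (fun e he => hall _ (pvMono_mem _ _ _ e he).1)
        simp only [show left' = left + 1 from rfl, hps'] at ih ⊢
        rw [h1, h2, h3]
        exact ih hpw hall
  | case2 ps left h =>
      intro hpw hge
      rw [pvShrinkA]
      by_cases hne : ps = []
      · subst hne
        rw [if_neg (by simp)]
      · rw [if_neg (by
          intro hcontra
          exact h ⟨hne, by
            rw [← pvMono_headD_max nums _ hne, ← pvMono_headD_min nums _ hne]
            exact hcontra.2⟩)]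

theorem pvShrinkB_post (nums : List Int) (k : Int) (ps : List Int) (left : Int) (n : Int) :
    List.Pairwise (· < ·) ps → (∀ i ∈ ps, left ≤ i) →
    left ≤ n → (∀ i ∈ ps, i + 1 ≤ n) →
    List.Pairwise (· < ·) (pvShrinkB nums k ps left).1 ∧
    (∀ i ∈ (pvShrinkB nums k ps left).1, (pvShrinkB nums k ps left).2 ≤ i) ∧
    (∀ i ∈ (pvShrinkB nums k ps left).1, i ∈ ps) ∧
    (pvShrinkB nums k ps left).2 ≤ n := by
  fun_induction pvShrinkB nums k ps left with
  | case1 ps left h left' ps' ih =>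
      intro hpw hge hln hin
      obtain ⟨i, rest, rfl⟩ := List.exists_cons_of_ne_nil h.1
      have hrest : ∀ x ∈ rest, i < x := (List.pairwise_cons.mp hpw).1
      have hgei : left ≤ i := hge i List.mem_cons_self
      have hini : i + 1 ≤ n := hin i List.mem_cons_self
      by_cases hi : i < left + 1
      · have hps' : ps' = rest := by
          show (if (i :: rest).headD 0 < left + 1 then (i :: rest).tail else i :: rest) = rest
          simp [hi]
        have := ih (by
            rw [hps']; exact (List.pairwise_cons.mp hpw).2)
          (by rw [hps']; intro x hx; have := hrest x hx; omega)
          (by omega)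
          (by rw [hps']; intro x hx; exact hin x (List.mem_cons_of_mem _ hx))
        refine ⟨this.1, this.2.1, ?_, this.2.2.2⟩
        intro x hx
        have := this.2.2.1 x hx
        rw [hps'] at this
        exact List.mem_cons_of_mem _ this
      · have hps' : ps' = i :: rest := by
          show (if (i :: rest).headD 0 < left + 1 then (i :: rest).tail else i :: rest) = i :: rest
          simp [hi]
        have := ih (by rw [hps']; exact hpw)
          (by
            rw [hps']
            intro x hx
            rcases List.mem_cons.mp hx with hh | hh
            · omega
            · have := hrest x hh; omega)
          (by omega)
          (by rw [hps']; exact hin)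
        refine ⟨this.1, this.2.1, ?_, this.2.2.2⟩
        intro x hx
        have := this.2.2.1 x hx
        rw [hps'] at this
        exact this
  | case2 ps left h =>
      intro hpw hge hln hin
      exact ⟨hpw, hge, fun i hi => hi, hln⟩

theorem pvNotLeFun (x : Int) : (fun a : Int => !decide (a ≤ x)) = (fun a : Int => decide (x < a)) := by
  funext a
  by_cases h : a ≤ x <;> simp [h] <;> omega

theorem pvNotGeFun (x : Int) : (fun a : Int => !decide (x ≤ a)) = (fun a : Int => decide (a < x)) := by
  funext a
  by_cases h : x ≤ a <;> simp [h] <;> omega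

theorem pvLoop_eq (nums : List Int) (isPrime : List Bool) (k : Int) :
    ∀ (pairs : List (Int × Int)) (r : Int) (ps : List Int) (left ans : Int),
    (∀ m (hm : m < pairs.length), pairs[m] = (r + m, pvVf nums (r + m))) →
    List.Pairwise (· < ·) ps → (∀ i ∈ ps, left ≤ i ∧ i < r) → left ≤ r →
    pairs.foldl (pvStepA isPrime k)
      (pvMono (pvVf nums) (fun a b => decide (a ≤ b)) ps,
       pvMono (pvVf nums) (fun a b => decide (b ≤ a)) ps, ps, left, ans)
      = ((pvMono (pvVf nums) (fun a b => decide (a ≤ b)) (pairs.foldl (pvStepB nums isPrime k) (ps, left, ans)).1),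
         (pvMono (pvVf nums) (fun a b => decide (b ≤ a)) (pairs.foldl (pvStepB nums isPrime k) (ps, left, ans)).1),
         (pairs.foldl (pvStepB nums isPrime k) (ps, left, ans)).1,
         (pairs.foldl (pvStepB nums isPrime k) (ps, left, ans)).2.1,
         (pairs.foldl (pvStepB nums isPrime k) (ps, left, ans)).2.2) := by
  intro pairs
  induction pairs with
  | nil =>
      intro r ps left ans _ _ _ _
      rfl
  | cons rv pairs ih =>
      intro r ps left ans hp hpw hlt hleft
      have hrv : rv = (r, pvVf nums r) := by
        have := hp 0 (by simp)
        simpa using this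
      subst hrv
      rw [List.foldl_cons, List.foldl_cons]
      -- the window after the (possible) append of index r
      have hp' : ∀ m (hm : m < pairs.length),
          pairs[m] = (r + 1 + m, pvVf nums (r + 1 + m)) := by
        intro m hm
        have h0 := hp (m + 1) (by simpa using Nat.succ_lt_succ hm)
        have hc : (((m + 1 : Nat)) : Int) = (m : Int) + 1 := by push_cast; ring
        rw [List.getElem_cons_succ] at h0
        rw [h0, hc]
        have h2 : r + ((m : Int) + 1) = r + 1 + (m : Int) := by ring
        rw [h2]
      by_cases hprime : PySem.List.pyGetD isPrime (pvVf nums r) false = true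
      · -- prime: both sides append index r
        have hpw1 : List.Pairwise (· < ·) (ps ++ [r]) := by
          rw [List.pairwise_append]
          exact ⟨hpw, List.pairwise_singleton _ _,
            fun a ha b hb => by simp at hb; subst hb; exact (hlt a ha).2⟩
        have hge1 : ∀ i ∈ ps ++ [r], left ≤ i := by
          intro i hi
          rcases List.mem_append.mp hi with h | h
          · exact (hlt i h).1
          · simp at h; omega
        have hlt1 : ∀ i ∈ ps ++ [r], i + 1 ≤ r + 1 := by
          intro i hi
          rcases List.mem_append.mp hi with h | h
          · have := (hlt i h).2; omega
          · simp at h; omega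
        have hmin1 : pvPopBackGT (pvMono (pvVf nums) (fun a b => decide (a ≤ b)) ps) (pvVf nums r)
              ++ [(r, pvVf nums r)]
            = pvMono (pvVf nums) (fun a b => decide (a ≤ b)) (ps ++ [r]) := by
          rw [pvMono_append _ _ pvRle_hR1 ps r, pvPopBackGT_eq_dropBack, pvNotLeFun]
        have hmax1 : pvPopBackLT (pvMono (pvVf nums) (fun a b => decide (b ≤ a)) ps) (pvVf nums r)
              ++ [(r, pvVf nums r)]
            = pvMono (pvVf nums) (fun a b => decide (b ≤ a)) (ps ++ [r]) := by
          rw [pvMono_append _ _ pvRge_hR1 ps r, pvPopBackLT_eq_dropBack, pvNotGeFun]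
        have hpost := pvShrinkB_post nums k (ps ++ [r]) left (r + 1) hpw1 hge1 (by omega) hlt1
        simp only [pvStepA, pvStepB, hprime, if_true]
        rw [hmin1, hmax1, pvShrink_eq nums k (ps ++ [r]) left hpw1 hge1]
        exact ih (r + 1) _ _ _ hp' hpost.1
          (fun i hi => ⟨hpost.2.1 i hi, by
            have := hpost.2.2.1 i hi
            have := hlt1 i this
            omega⟩)
          hpost.2.2.2
      · -- not prime: the window is unchanged before shrinking
        have hge1 : ∀ i ∈ ps, left ≤ i := fun i hi => (hlt i hi).1
        have hlt1 : ∀ i ∈ ps, i + 1 ≤ r + 1 := fun i hi => by have := (hlt i hi).2; omega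
        have hpost := pvShrinkB_post nums k ps left (r + 1) hpw hge1 (by omega) hlt1
        simp only [pvStepA, pvStepB, hprime, Bool.false_eq_true, if_false]
        rw [pvShrink_eq nums k ps left hpw hge1]
        exact ih (r + 1) _ _ _ hp' hpost.1
          (fun i hi => ⟨hpost.2.1 i hi, by
            have := hpost.2.2.1 i hi
            have := hlt1 i this
            omega⟩)
          hpost.2.2.2

theorem pvEnum_get (nums : List Int) : ∀ (s : Int) (m : Nat) (hm : m < nums.length),
    (PySem.List.enumerate nums s)[m]? = some (s + m, nums[m]'hm) := by
  induction nums with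
  | nil => intro s m hm; simp at hm
  | cons x xs ih =>
      intro s m hm
      rw [PySem.List.enumerate_cons]
      cases m with
      | zero => simp
      | succ m =>
          have hm' : m < xs.length := by simpa using hm
          rw [List.getElem?_cons_succ, ih (s + 1) m hm']
          simp only [List.getElem_cons_succ, Option.some.injEq, Prod.mk.injEq]
          refine ⟨by push_cast; ring, ?_⟩
          trivial

-- ===== VERDICT (by name: the statement is the Claim_ definition above) =====
theorem pvSieveB_eq_sieveA (limit : Int) : pvSieveB limit = pvSieveA limit := rfl

theorem primeSubarray_spec : Claim_equal_primeSubarray := by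
  unfold Claim_equal_primeSubarray
  intro nums k _ _
  unfold Spec_primeSubarray primeSubarray primeSubarray_alt
  by_cases hlen : nums.length < 2
  · rw [if_pos hlen, if_pos hlen]
  · rw [if_neg hlen, if_neg hlen, pvSieveB_eq_sieveA]
    have hp : ∀ m (hm : m < (PySem.List.enumerate nums 0).length),
        (PySem.List.enumerate nums 0)[m] = ((0 : Int) + m, pvVf nums ((0 : Int) + m)) := by
      intro m hm
      have hm' : m < nums.length := by
        simpa [PySem.List.length_enumerate] using hm
      have h := pvEnum_get nums 0 m hm'
      have h2 : (PySem.List.enumerate nums 0)[m] = ((0 : Int) + m, nums[m]'hm') := by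
        rw [← Option.some_inj, ← List.getElem?_eq_getElem]
        exact h
      rw [h2]
      have h3 : pvVf nums ((0 : Int) + m) = nums[m]'hm' := by
        unfold pvVf
        rw [zero_add]
        rw [PySem.List.pyGetD_natCast]
        exact List.getD_eq_getElem nums 0 hm'
      rw [h3]
    have := pvLoop_eq nums
      (pvSieveA ((PySem.List.max? nums (fun x => x)).getD 0)) k
      (PySem.List.enumerate nums 0) 0 [] 0 0 hp List.Pairwise.nil
      (by intro i hi; simp at hi) (le_refl 0)
    have hmn : pvMono (pvVf nums) (fun a b => decide (a ≤ b)) ([] : List Int) = [] := rfl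
    have hmx : pvMono (pvVf nums) (fun a b => decide (b ≤ a)) ([] : List Int) = [] := rfl
    rw [hmn, hmx] at this
    show (List.foldl (pvStepA (pvSieveA ((PySem.List.max? nums fun x => x).getD 0)) k)
        ([], [], [], 0, 0) (PySem.List.enumerate nums)).2.2.2.2
      = (List.foldl (pvStepB nums (pvSieveA ((PySem.List.max? nums fun x => x).getD 0)) k)
        ([], 0, 0) (PySem.List.enumerate nums)).2.2
    rw [this]
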